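-- pv_equiv track=rewrite | github.com/A-Muhammadali/list_search | find08_min_count.py | find_min_count
-- ===== SOURCE A (Python) =====
-- def find_min_count(data):
--     """
--     Given the list of numbers, Find count of minimum numbers in the list
--     args:
--         data: list of numbers
--     returns: count of minimum numbers in the list
--     """
--     a=data[0]
--     k=1
--     b=len(data)
--     while k<b:
--         if a>data[k]:
--             a=data[k]
--         k=k+1
--     return data.count(a)
-- ===== SOURCE B (Python) =====
-- def find_min_count(data):
--     m = data[0]
--     c = 1
--     for x in data[1:]:
--         if x < m:
--             m = x
--             c = 1
--         elif x == m:
--             c += 1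
--     return c
-- ===== Notes on version B (the rewrite author's own statement) =====
-- stated objective: alternative
-- what changed: Single pass maintaining the current minimum and its running count together, instead of a while-loop min scan followed by a second data.count pass.
import Mathlib
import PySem

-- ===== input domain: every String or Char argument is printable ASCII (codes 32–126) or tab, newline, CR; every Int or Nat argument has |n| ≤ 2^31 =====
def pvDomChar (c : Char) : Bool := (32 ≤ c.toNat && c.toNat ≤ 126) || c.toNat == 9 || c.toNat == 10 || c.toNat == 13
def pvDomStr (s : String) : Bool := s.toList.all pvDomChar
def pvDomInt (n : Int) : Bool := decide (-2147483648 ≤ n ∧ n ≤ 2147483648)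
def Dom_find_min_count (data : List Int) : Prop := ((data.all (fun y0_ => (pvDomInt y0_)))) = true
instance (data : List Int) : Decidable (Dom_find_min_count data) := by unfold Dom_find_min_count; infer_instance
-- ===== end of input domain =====

-- B replaces A's min-scan-then-count (two passes) with a single pass maintaining the
-- current minimum and its running count; 'alternative' decomposition, same cost.


-- ===== PORT A =====
-- a = data[0]; while k < b: if a > data[k]: a = data[k]; return data.count(a)
def find_min_count (data : List Int) : Int :=
  match data with
  | [] => 0   -- unreachable under Pre_ (Python raises IndexError on data[0])
  | d0 :: rest =>
    let a := rest.foldl (fun a x => if a > x then x else a) d0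
    ((d0 :: rest).count a : Int)

-- ===== PORT B =====
-- single pass over data[1:] maintaining (current min m, its count c)
def find_min_count_alt (data : List Int) : Int :=
  match data with
  | [] => 0   -- unreachable under Pre_ (Python raises IndexError on data[0])
  | d0 :: rest =>
    (rest.foldl (fun (mc : Int × Int) x =>
        if x < mc.1 then (x, 1)
        else if x = mc.1 then (mc.1, mc.2 + 1)
        else mc) (d0, 1)).2

-- ===== PRECONDITION & SPEC =====
-- Pre_ excludes only the empty list, on which A (data[0]) raises IndexError.
def Pre_find_min_count (data : List Int) : Prop := data ≠ []
instance (data : List Int) : Decidable (Pre_find_min_count data) := by unfold Pre_find_min_count; infer_instance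
def pvWitness_find_min_count : List Int := [3, 1, 1, 2]

def Spec_find_min_count (data : List Int) (out : Int) : Prop := out = find_min_count_alt data
instance (data : List Int) (out : Int) : Decidable (Spec_find_min_count data out) := by unfold Spec_find_min_count; infer_instance

-- ===== CLAIM (what is proved, stated in full; the proofs are below) =====
def Claim_equal_find_min_count : Prop := ∀ (data : List Int), Dom_find_min_count data → Pre_find_min_count data → Spec_find_min_count data (find_min_count data)

-- ===== LEMMAS AND PROOFS =====

-- The running minimum of A's scan never exceeds its starting value.
theorem foldmin_le (t : List Int) : ∀ (x : Int),
    t.foldl (fun a y => if a > y then y else a) x ≤ x := by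
  induction t with
  | nil => intro x; simp
  | cons y ys ih =>
    intro x
    simp only [List.foldl_cons]
    by_cases h : x > y
    · rw [if_pos h]; have := ih y; omega
    · rw [if_neg h]; exact ih x

-- Invariant: if m is a minimum of 'seen' and the count component equals m's count in 'seen',
-- the pair fold over l yields the minimum m' of seen ++ l together with its count in seen ++ l.
theorem pair_fold_inv (l : List Int) : ∀ (seen : List Int) (m : Int),
    (∀ x ∈ seen, m ≤ x) →
    l.foldl (fun (mc : Int × Int) x =>
        if x < mc.1 then (x, 1)
        else if x = mc.1 then (mc.1, mc.2 + 1)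
        else mc) (m, (seen.count m : Int))
      = (l.foldl (fun a x => if a > x then x else a) m,
         (((seen ++ l).count (l.foldl (fun a x => if a > x then x else a) m)) : Int)) := by
  induction l with
  | nil => intro seen m _; simp
  | cons x t ih =>
    intro seen m hmin
    simp only [List.foldl_cons]
    by_cases hx : x < m
    · rw [if_pos hx, show (if m > x then x else m) = x by omega]
      have hthis := ih [x] x (by intro y hy; simp at hy; omega)
      have hc : (([x].count x : Nat) : Int) = 1 := by simp
      rw [hc] at hthis
      rw [hthis]
      set m' := t.foldl (fun a y => if a > y then y else a) x with hm'
      have hm'le : m' ≤ x := foldmin_le t x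
      have hseen0 : seen.count m' = 0 := by
        rw [List.count_eq_zero]
        intro hmem
        have := hmin m' hmem
        omega
      have hcnt : (seen ++ x :: t).count m' = ([x] ++ t).count m' := by
        rw [show (x :: t) = [x] ++ t from rfl, ← List.append_assoc]
        simp [List.count_append, hseen0]
      rw [hcnt]
    · rw [if_neg hx, show (if m > x then x else m) = m by omega]
      have hthis := ih (seen ++ [x]) m
        (by intro y hy; simp at hy; rcases hy with h | h; exacts [hmin y h, by omega])
      by_cases he : x = m
      · rw [if_pos he]
        have hcnt : ((seen ++ [x]).count m : Int) = (seen.count m : Int) + 1 := by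
          simp [List.count_append, he]
        rw [hcnt] at hthis
        rw [hthis]
        simp [List.append_assoc]
      · rw [if_neg he]
        have hcnt : ((seen ++ [x]).count m : Int) = (seen.count m : Int) := by
          simp [List.count_append, he]
        rw [hcnt] at hthis
        rw [hthis]
        simp [List.append_assoc]

-- ===== VERDICT (by name: the statement is the Claim_ definition above) =====
theorem find_min_count_spec : Claim_equal_find_min_count := by
  intro data _ hpre
  unfold Spec_find_min_count find_min_count find_min_count_alt
  match data with
  | [] => exact absurd rfl hpre
  | d0 :: rest =>
    simp only
    have h := pair_fold_inv rest [d0] d0 (by intro x hx; simp at hx; omega)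
    have hc : (([d0].count d0 : Nat) : Int) = 1 := by simp
    rw [hc] at h
    rw [h]
    simp
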